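-- pv_equiv track=rewrite | github.com/ncfrey/pytopomat | pytopomat/workflows/core.py | _is_permutation_eq
-- ===== SOURCE A (Python) =====
-- def _is_permutation_eq(A, B):
--     """
--     Check for equivalency between two arrays including permutations.
--
--     Returns:
--         Whether the two arrays are equivalent (True) or not (False).
--
--     """
--     count = {}
--     for a in A:
--         count[str(a)] = 1
--
--     for b in B:
--         if str(b) in count:
--             if count[str(b)] == 0:
--                 return False
--             else:
--                 count[str(b)] = count[str(b)] - 1
--         else:
--             return False
--
--     return True
-- ===== SOURCE B (Python) =====
-- def _is_permutation_eq(A, B):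
--     """
--     Check for equivalency between two arrays including permutations.
--
--     Returns:
--         Whether the two arrays are equivalent (True) or not (False).
--
--     """
--     S = {str(a) for a in A}
--     bs = [str(b) for b in B]
--     return all(x in S for x in bs) and len(set(bs)) == len(bs)
-- ===== Notes on version B (the rewrite author's own statement) =====
-- stated objective: simpler
-- what changed: Replaces A's mutable count-dict with interleaved guard/decrement/early-return loop by two independent declarative checks: membership of every str(b) in the set of str(a)'s, plus a set-cardinality test that B's strings are pairwise distinct.
import Mathlib
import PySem

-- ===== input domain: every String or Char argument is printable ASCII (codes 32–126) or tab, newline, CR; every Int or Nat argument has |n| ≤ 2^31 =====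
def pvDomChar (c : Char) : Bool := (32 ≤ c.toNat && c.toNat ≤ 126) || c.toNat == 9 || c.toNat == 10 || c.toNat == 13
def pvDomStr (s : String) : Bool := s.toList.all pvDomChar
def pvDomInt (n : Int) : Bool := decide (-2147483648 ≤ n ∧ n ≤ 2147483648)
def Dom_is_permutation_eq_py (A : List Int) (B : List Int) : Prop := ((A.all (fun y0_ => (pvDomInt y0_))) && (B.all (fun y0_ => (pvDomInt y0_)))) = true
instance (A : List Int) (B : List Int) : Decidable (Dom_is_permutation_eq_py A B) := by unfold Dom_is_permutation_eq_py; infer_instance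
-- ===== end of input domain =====

-- B replaces A's interleaved count-dict/decrement loop with two independent checks
-- (membership in the set of A-strings, and distinctness of B-strings via set cardinality); objective: simpler.


-- ===== PORT A =====
-- the 'for b in B' loop with its early returns
def pvALoop (count : PySem.Dict String Int) (B : List Int) : Bool :=
  match B with
  | [] => true
  | b :: rest =>
    match count.get? (PySem.Int.toStr b) with
    | none => false
    | some c =>
      if c = 0 then false
      else pvALoop (count.insert (PySem.Int.toStr b) (c - 1)) rest

def is_permutation_eq_py (A : List Int) (B : List Int) : Bool :=
  let count := A.foldl (fun d a => d.insert (PySem.Int.toStr a) (1 : Int)) PySem.Dict.empty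
  pvALoop count B

-- ===== PORT B =====
def is_permutation_eq_py_alt (A : List Int) (B : List Int) : Bool :=
  let S : PySem.Set String := PySem.Set.ofList (A.map PySem.Int.toStr)
  let bs := B.map PySem.Int.toStr
  (bs.all (fun x => PySem.Set.contains S x)) && ((PySem.Set.ofList bs).length = bs.length)

-- ===== PRECONDITION & SPEC =====
def Spec_is_permutation_eq_py (A : List Int) (B : List Int) (out : Bool) : Prop := out = is_permutation_eq_py_alt A B
instance (A : List Int) (B : List Int) (out : Bool) : Decidable (Spec_is_permutation_eq_py A B out) := by unfold Spec_is_permutation_eq_py; infer_instance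

-- ===== CLAIM (what is proved, stated in full; the proofs are below) =====
def Claim_equal_is_permutation_eq_py : Prop := ∀ (A : List Int) (B : List Int), Dom_is_permutation_eq_py A B → Spec_is_permutation_eq_py A B (is_permutation_eq_py A B)

-- ===== LEMMAS AND PROOFS =====

-- the dict built by A's first loop maps exactly the strings of A to 1
theorem pv_build_get? (A : List Int) (d : PySem.Dict String Int) (s : String) :
    (A.foldl (fun d a => d.insert (PySem.Int.toStr a) (1 : Int)) d).get? s
      = if s ∈ A.map PySem.Int.toStr then some 1 else d.get? s := by
  induction A generalizing d with
  | nil => simp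
  | cons a A ih =>
    simp only [List.foldl_cons, ih, List.map_cons, List.mem_cons]
    rw [PySem.Dict.get?_insert]
    by_cases h1 : s ∈ A.map PySem.Int.toStr <;> by_cases h2 : s = PySem.Int.toStr a <;>
      simp [h1, h2]

-- A's second loop, on any dict with 0/1 values, checks membership-with-consumption
theorem pvALoop_cons_none (b : Int) (B : List Int) (d : PySem.Dict String Int)
    (h : d.get? (PySem.Int.toStr b) = none) : pvALoop d (b :: B) = false := by
  simp [pvALoop, h]

theorem pvALoop_cons_some (b : Int) (B : List Int) (d : PySem.Dict String Int) (c : Int)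
    (h : d.get? (PySem.Int.toStr b) = some c) :
    pvALoop d (b :: B) =
      if c = 0 then false else pvALoop (d.insert (PySem.Int.toStr b) (c - 1)) B := by
  simp [pvALoop, h]

-- A's second loop, on any dict with 0/1 values, checks membership-with-consumption
theorem pv_loop_iff (B : List Int) (d : PySem.Dict String Int)
    (hv : ∀ s c, d.get? s = some c → c = 0 ∨ c = 1) :
    pvALoop d B = true ↔
      ((B.map PySem.Int.toStr).Nodup ∧ ∀ s ∈ B.map PySem.Int.toStr, d.get? s = some 1) := by
  induction B generalizing d with
  | nil => simp [pvALoop]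
  | cons b B ih =>
    cases hg : d.get? (PySem.Int.toStr b) with
    | none =>
      rw [pvALoop_cons_none b B d hg]
      simp only [List.map_cons, List.nodup_cons]
      constructor
      · intro h; cases h
      · rintro ⟨-, h⟩
        have := h (PySem.Int.toStr b) (by simp)
        rw [hg] at this; cases this
    | some c =>
      rw [pvALoop_cons_some b B d c hg]
      rcases hv _ _ hg with rfl | rfl
      · simp only [List.map_cons, List.nodup_cons]
        constructor
        · intro h; cases h
        · rintro ⟨-, h⟩
          have := h (PySem.Int.toStr b) (by simp)
          rw [hg] at this
          exact absurd (Option.some.inj this) (by norm_num)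
      · rw [if_neg (by norm_num)]
        have hv' : ∀ s c, (d.insert (PySem.Int.toStr b) (1 - 1)).get? s = some c → c = 0 ∨ c = 1 := by
          intro s c h
          rw [PySem.Dict.get?_insert] at h
          split at h
          · left; have := Option.some.inj h; omega
          · exact hv _ _ h
        rw [ih _ hv']
        constructor
        · rintro ⟨hnd, hall⟩
          refine ⟨?_, ?_⟩
          · simp only [List.map_cons, List.nodup_cons]
            refine ⟨?_, hnd⟩
            intro hmem
            have := hall _ hmem
            rw [PySem.Dict.get?_insert, if_pos rfl] at this
            exact absurd (Option.some.inj this) (by norm_num)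
          · intro s hs
            simp only [List.map_cons, List.mem_cons] at hs
            rcases hs with rfl | hs
            · exact hg
            · have := hall _ hs
              rw [PySem.Dict.get?_insert] at this
              split at this
              · exact absurd (Option.some.inj this) (by norm_num)
              · exact this
        · rintro ⟨hnd, hall⟩
          simp only [List.map_cons, List.nodup_cons] at hnd
          refine ⟨hnd.2, ?_⟩
          intro s hs
          rw [PySem.Dict.get?_insert]
          rw [if_neg (by rintro rfl; exact hnd.1 hs)]
          exact hall _ (by simp [hs])

-- set(l) has fewer elements than l when l has a duplicate
theorem pv_length_ofList_lt {α : Type} [BEq α] [LawfulBEq α] (l : List α) (h : ¬ l.Nodup) :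
    (PySem.Set.ofList l).length < l.length := by
  induction l with
  | nil => exact absurd List.nodup_nil h
  | cons x xs ih =>
    rw [PySem.Set.ofList_cons]
    simp only [List.nodup_cons, not_and_or] at h
    simp only [List.length_cons, Nat.add_lt_add_iff_right]
    rcases h with h | h
    · rw [not_not] at h
      calc (PySem.Set.discard (PySem.Set.ofList xs) x).length
          < (PySem.Set.ofList xs).length := by
            rw [PySem.Set.discard, List.length_filter_lt_length_iff_exists]
            exact ⟨x, (PySem.Set.mem_ofList _ _).mpr h, by simp⟩
        _ ≤ xs.length := PySem.Set.length_ofList_le xs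
    · calc (PySem.Set.discard (PySem.Set.ofList xs) x).length
          ≤ (PySem.Set.ofList xs).length := List.length_filter_le _ _
        _ < xs.length := ih h

theorem pv_length_ofList_eq_iff {α : Type} [BEq α] [LawfulBEq α] (l : List α) :
    ((PySem.Set.ofList l).length = l.length) ↔ l.Nodup := by
  constructor
  · intro h
    by_contra hnd
    exact absurd h (Nat.ne_of_lt (pv_length_ofList_lt l hnd))
  · intro h; rw [PySem.Set.ofList_eq_self_of_nodup l h]

-- ===== VERDICT (by name: the statement is the Claim_ definition above) =====
theorem is_permutation_eq_py_spec : Claim_equal_is_permutation_eq_py := by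
  intro A B _
  unfold Spec_is_permutation_eq_py is_permutation_eq_py is_permutation_eq_py_alt
  rw [Bool.eq_iff_iff]
  have hv : ∀ s c,
      (A.foldl (fun d a => d.insert (PySem.Int.toStr a) (1 : Int)) PySem.Dict.empty).get? s = some c →
      c = 0 ∨ c = 1 := by
    intro s c h
    rw [pv_build_get?] at h
    split at h
    · right; exact (Option.some.inj h).symm
    · rw [PySem.Dict.get?_empty] at h; cases h
  rw [pv_loop_iff _ _ hv]
  simp only [Bool.and_eq_true, List.all_eq_true, decide_eq_true_eq,
    PySem.Set.contains_iff, PySem.Set.mem_ofList, pv_length_ofList_eq_iff]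
  constructor
  · rintro ⟨hnd, hall⟩
    refine ⟨?_, hnd⟩
    intro s hs
    have := hall _ hs
    rw [pv_build_get?] at this
    split at this
    · assumption
    · rw [PySem.Dict.get?_empty] at this; cases this
  · rintro ⟨hall, hnd⟩
    refine ⟨hnd, ?_⟩
    intro s hs
    rw [pv_build_get?, if_pos (hall _ hs)]
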